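-- pv_equiv track=rewrite | github.com/vivekkum1234/AvailityPOC | scripts/advanced_pdf_extractor.py | _categorize_field
-- ===== SOURCE A (Python) =====
-- def _categorize_field(field_name: str, label: str) -> str:
--     """Categorize field into sections"""
--     text = f"{field_name} {label}".lower()
--
--     if any(keyword in text for keyword in ['patient', 'member', 'subscriber', 'beneficiary']):
--         return "patient_info"
--     elif any(keyword in text for keyword in ['provider', 'physician', 'doctor', 'npi']):
--         return "provider_info"
--     elif any(keyword in text for keyword in ['insurance', 'plan', 'coverage', 'policy']):
--         return "insurance_info"
--     elif any(keyword in text for keyword in ['service', 'procedure', 'diagnosis', 'treatment']):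
--         return "service_info"
--     elif any(keyword in text for keyword in ['auth', 'approval', 'certification']):
--         return "authorization"
--     else:
--         return "other"
-- ===== SOURCE B (Python) =====
-- _FLAT_KEYWORDS = [
--     ("patient", 0, "patient_info"), ("member", 0, "patient_info"),
--     ("subscriber", 0, "patient_info"), ("beneficiary", 0, "patient_info"),
--     ("provider", 1, "provider_info"), ("physician", 1, "provider_info"),
--     ("doctor", 1, "provider_info"), ("npi", 1, "provider_info"),
--     ("insurance", 2, "insurance_info"), ("plan", 2, "insurance_info"),
--     ("coverage", 2, "insurance_info"), ("policy", 2, "insurance_info"),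
--     ("service", 3, "service_info"), ("procedure", 3, "service_info"),
--     ("diagnosis", 3, "service_info"), ("treatment", 3, "service_info"),
--     ("auth", 4, "authorization"), ("approval", 4, "authorization"),
--     ("certification", 4, "authorization"),
-- ]
--
-- def _categorize_field(field_name: str, label: str) -> str:
--     """Categorize field into sections: one flat pass keeping the best-priority match."""
--     text = (field_name + " " + label).lower()
--     best = (5, "other")
--     for kw, pri, name in _FLAT_KEYWORDS:
--         if pri < best[0] and kw in text:
--             best = (pri, name)
--     return best[1]
-- ===== Notes on version B (the rewrite author's own statement) =====
-- stated objective: alternative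
-- what changed: Replaced the if/elif chain of per-category any() checks by a single flat pass over a keyword->(priority, category) table that keeps the minimum-priority matching keyword in an accumulator and returns its category.
import Mathlib
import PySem

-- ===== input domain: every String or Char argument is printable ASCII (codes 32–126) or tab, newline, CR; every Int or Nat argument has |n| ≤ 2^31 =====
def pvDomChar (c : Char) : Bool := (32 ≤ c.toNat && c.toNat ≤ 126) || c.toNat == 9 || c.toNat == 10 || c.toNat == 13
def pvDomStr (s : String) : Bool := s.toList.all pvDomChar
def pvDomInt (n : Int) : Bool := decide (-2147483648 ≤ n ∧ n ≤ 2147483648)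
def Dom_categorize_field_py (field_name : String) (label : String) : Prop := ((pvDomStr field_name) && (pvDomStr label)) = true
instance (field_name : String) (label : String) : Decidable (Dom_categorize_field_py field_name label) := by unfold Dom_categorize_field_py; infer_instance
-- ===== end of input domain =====

-- B replaces A's if/elif chain by one flat pass over a keyword->(priority, category) table
-- keeping the minimum-priority match (alternative decomposition; same behaviour, same cost).

-- ===== PORT A =====
def categorize_field_py (field_name : String) (label : String) : String :=
  let text := PySem.Str.lower (field_name ++ " " ++ label)
  if ["patient", "member", "subscriber", "beneficiary"].any (fun k => PySem.Str.isIn k text) then "patient_info"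
  else if ["provider", "physician", "doctor", "npi"].any (fun k => PySem.Str.isIn k text) then "provider_info"
  else if ["insurance", "plan", "coverage", "policy"].any (fun k => PySem.Str.isIn k text) then "insurance_info"
  else if ["service", "procedure", "diagnosis", "treatment"].any (fun k => PySem.Str.isIn k text) then "service_info"
  else if ["auth", "approval", "certification"].any (fun k => PySem.Str.isIn k text) then "authorization"
  else "other"

-- ===== PORT B =====
def pvFlatKeywords : List (String × Nat × String) :=
  [("patient", 0, "patient_info"), ("member", 0, "patient_info"),
   ("subscriber", 0, "patient_info"), ("beneficiary", 0, "patient_info"),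
   ("provider", 1, "provider_info"), ("physician", 1, "provider_info"),
   ("doctor", 1, "provider_info"), ("npi", 1, "provider_info"),
   ("insurance", 2, "insurance_info"), ("plan", 2, "insurance_info"),
   ("coverage", 2, "insurance_info"), ("policy", 2, "insurance_info"),
   ("service", 3, "service_info"), ("procedure", 3, "service_info"),
   ("diagnosis", 3, "service_info"), ("treatment", 3, "service_info"),
   ("auth", 4, "authorization"), ("approval", 4, "authorization"),
   ("certification", 4, "authorization")]

-- the loop body: 'if pri < best[0] and kw in text: best = (pri, name)' ('and' short-circuits → nested ifs)
def pvStep (text : String) (best : Nat × String) (e : String × Nat × String) : Nat × String :=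
  if e.2.1 < best.1 then (if PySem.Str.isIn e.1 text then (e.2.1, e.2.2) else best) else best

def categorize_field_py_alt (field_name : String) (label : String) : String :=
  let text := PySem.Str.lower (field_name ++ " " ++ label)
  (pvFlatKeywords.foldl (pvStep text) (5, "other")).2

-- ===== PRECONDITION & SPEC =====
def Spec_categorize_field_py (field_name : String) (label : String) (out : String) : Prop := out = categorize_field_py_alt field_name label
instance (field_name : String) (label : String) (out : String) : Decidable (Spec_categorize_field_py field_name label out) := by unfold Spec_categorize_field_py; infer_instance

-- ===== CLAIM (what is proved, stated in full; the proofs are below) =====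
def Claim_equal_categorize_field_py : Prop := ∀ (field_name : String) (label : String), Dom_categorize_field_py field_name label → Spec_categorize_field_py field_name label (categorize_field_py field_name label)

-- ===== LEMMAS AND PROOFS =====

-- folding the loop body over one category's keywords (same priority p and name) updates the
-- accumulator exactly when p beats the current best and some keyword of the category matches
theorem pvStep_group (text : String) (p : Nat) (name : String) (best : Nat × String) (ks : List String) :
    List.foldl (pvStep text) best (ks.map (fun k => (k, p, name))) =
      if p < best.1 ∧ ks.any (fun k => PySem.Str.isIn k text) then (p, name) else best := by
  induction ks generalizing best with
  | nil => simp
  | cons k ks ih =>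
    simp only [List.map_cons, List.foldl_cons, List.any_cons, pvStep]
    by_cases hm : PySem.Chars.isIn k.toList text.toList = true <;>
      by_cases hp : p < best.1 <;>
        simp [PySem.Str.isIn, hm, hp, ih]

theorem pvFlat_split : pvFlatKeywords =
    (["patient", "member", "subscriber", "beneficiary"].map (fun k => (k, 0, "patient_info"))) ++
    (["provider", "physician", "doctor", "npi"].map (fun k => (k, 1, "provider_info"))) ++
    (["insurance", "plan", "coverage", "policy"].map (fun k => (k, 2, "insurance_info"))) ++
    (["service", "procedure", "diagnosis", "treatment"].map (fun k => (k, 3, "service_info"))) ++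
    (["auth", "approval", "certification"].map (fun k => (k, 4, "authorization"))) := rfl

-- ===== VERDICT (by name: the statement is the Claim_ definition above) =====
theorem categorize_field_py_spec : Claim_equal_categorize_field_py := by
  intro field_name label _
  unfold Spec_categorize_field_py categorize_field_py categorize_field_py_alt
  rw [pvFlat_split]
  simp only [List.foldl_append, pvStep_group]
  generalize (["patient", "member", "subscriber", "beneficiary"].any
      (fun k => PySem.Str.isIn k (PySem.Str.lower (field_name ++ " " ++ label)))) = b0
  generalize (["provider", "physician", "doctor", "npi"].any
      (fun k => PySem.Str.isIn k (PySem.Str.lower (field_name ++ " " ++ label)))) = b1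
  generalize (["insurance", "plan", "coverage", "policy"].any
      (fun k => PySem.Str.isIn k (PySem.Str.lower (field_name ++ " " ++ label)))) = b2
  generalize (["service", "procedure", "diagnosis", "treatment"].any
      (fun k => PySem.Str.isIn k (PySem.Str.lower (field_name ++ " " ++ label)))) = b3
  generalize (["auth", "approval", "certification"].any
      (fun k => PySem.Str.isIn k (PySem.Str.lower (field_name ++ " " ++ label)))) = b4
  cases b0 <;> cases b1 <;> cases b2 <;> cases b3 <;> cases b4 <;> simp
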